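-- pv_equiv track=rewrite | github.com/claudlos/Kryptos | strategy40b_key_pattern_deep.py | check_periodicity
-- ===== SOURCE A (Python) =====
-- def check_periodicity(key_map, positions):
--     """Check which periods are consistent with the forced key values."""
--     consistent_periods = []
--     for period in range(1, 50):
--         ok = True
--         # Group positions by their index mod period
--         groups = {}
--         for pos in positions:
--             bucket = pos % period
--             if bucket not in groups:
--                 groups[bucket] = []
--             groups[bucket].append(key_map[pos])
--         # Check each group has the same value
--         for bucket, vals in groups.items():
--             if len(set(vals)) > 1:
--                 ok = False
--                 break
--         if ok:
--             consistent_periods.append(period)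
--     return consistent_periods
-- ===== SOURCE B (Python) =====
-- def check_periodicity(key_map, positions):
--     """A period p is consistent iff no two positions with different key values
--     are congruent mod p; mark divisors of |i-j| per differing pair instead of
--     grouping buckets per period."""
--     pairs = [(p, key_map[p]) for p in positions]
--     bad = set()
--     for i, (p1, v1) in enumerate(pairs):
--         for (p2, v2) in pairs[i + 1:]:
--             if v1 != v2:
--                 d = abs(p1 - p2)
--                 for period in range(1, 50):
--                     if d % period == 0:
--                         bad.add(period)
--     return [p for p in range(1, 50) if p not in bad]
-- ===== Notes on version B (the rewrite author's own statement) =====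
-- stated objective: alternative
-- what changed: Replaced the per-period residue-bucket grouping (dict of lists, then a set() cardinality test per bucket) by per-pair divisor marking: each unordered pair of positions with different key values marks every period in 1..49 dividing their distance as bad, and the result is the unmarked periods; Pre_ only excludes inputs where both programs raise KeyError (a position missing from key_map).
import Mathlib
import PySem

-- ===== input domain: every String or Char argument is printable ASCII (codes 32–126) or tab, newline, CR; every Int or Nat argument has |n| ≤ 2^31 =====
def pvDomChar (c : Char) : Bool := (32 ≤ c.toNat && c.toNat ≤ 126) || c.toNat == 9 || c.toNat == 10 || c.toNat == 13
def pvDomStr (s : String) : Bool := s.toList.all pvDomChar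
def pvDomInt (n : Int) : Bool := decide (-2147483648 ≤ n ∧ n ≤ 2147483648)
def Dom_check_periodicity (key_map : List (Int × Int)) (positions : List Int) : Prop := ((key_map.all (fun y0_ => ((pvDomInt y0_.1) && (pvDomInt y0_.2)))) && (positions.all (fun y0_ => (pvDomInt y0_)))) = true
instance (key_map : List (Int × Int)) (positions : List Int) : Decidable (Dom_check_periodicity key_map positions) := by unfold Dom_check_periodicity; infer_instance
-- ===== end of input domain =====

-- B replaces A's per-period residue-bucket grouping by per-pair divisor marking
-- (an alternative algorithm of similar cost); A = B on all inputs where A raises no KeyError.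


-- ===== PORT A =====
-- key_map[pos]; Pre_ guarantees the key is present, so the .getD 0 default is never taken.
def pvAVal (key_map : List (Int × Int)) (pos : Int) : Int :=
  ((PySem.Dict.mk key_map).get? pos).getD 0

-- 'if bucket not in groups: groups[bucket] = []' followed by 'groups[bucket].append(v)'
-- is exactly 'groups[bucket] = groups.get(bucket, []) + [v]' = Dict.modify bucket [] (· ++ [v]).
def pvGroups (key_map : List (Int × Int)) (period : Int) (positions : List Int) :
    PySem.Dict Int (List Int) :=
  positions.foldl
    (fun groups pos =>
      groups.modify (PySem.Int.mod pos period) [] (· ++ [pvAVal key_map pos]))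
    PySem.Dict.empty

-- the 'for bucket, vals in groups.items(): if len(set(vals)) > 1: ok = False; break' loop
def pvOkLoop : List (Int × List Int) → Bool
  | [] => true
  | (_, vals) :: rest =>
      if (PySem.Set.ofList vals).length > 1 then false else pvOkLoop rest

def check_periodicity (key_map : List (Int × Int)) (positions : List Int) : List Int :=
  (PySem.List.pyRange 1 50 1).foldl
    (fun consistent_periods period =>
      if pvOkLoop (pvGroups key_map period positions).items then
        consistent_periods ++ [period]
      else consistent_periods)
    []

-- ===== PORT B =====
-- inner 'for period in range(1, 50): if d % period == 0: bad.add(period)'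
def pvMark (d : Int) (bad : PySem.Set Int) : PySem.Set Int :=
  (PySem.List.pyRange 1 50 1).foldl
    (fun bad period =>
      if PySem.Int.mod d period == 0 then PySem.Set.add bad period else bad)
    bad

-- inner 'for (p2, v2) in pairs[i+1:]'
def pvInner (p1 v1 : Int) (rest : List (Int × Int)) (bad : PySem.Set Int) : PySem.Set Int :=
  rest.foldl
    (fun bad pv => if v1 ≠ pv.2 then pvMark |p1 - pv.1| bad else bad)
    bad

-- 'for i, (p1, v1) in enumerate(pairs): … pairs[i+1:] …' as recursion over suffixes
def pvBad : List (Int × Int) → PySem.Set Int → PySem.Set Int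
  | [], bad => bad
  | pv :: rest, bad => pvBad rest (pvInner pv.1 pv.2 rest bad)

def check_periodicity_alt (key_map : List (Int × Int)) (positions : List Int) : List Int :=
  let pairs := positions.map (fun p => (p, ((PySem.Dict.mk key_map).get? p).getD 0))
  let bad := pvBad pairs PySem.Set.empty
  (PySem.List.pyRange 1 50 1).filter (fun p => !(PySem.Set.contains bad p))

-- ===== PRECONDITION & SPEC =====
-- Pre_ excludes exactly the inputs on which Python A raises KeyError (a position
-- not present as a key of key_map); B raises KeyError there as well.
def Pre_check_periodicity (key_map : List (Int × Int)) (positions : List Int) : Prop :=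
  (positions.all (fun pos => ((PySem.Dict.mk key_map).get? pos).isSome)) = true

instance (key_map : List (Int × Int)) (positions : List Int) :
    Decidable (Pre_check_periodicity key_map positions) := by
  unfold Pre_check_periodicity; infer_instance

def pvWitness_check_periodicity : (List (Int × Int)) × List Int :=
  ([(0, 1), (2, 1), (3, 2)], [0, 2, 3])

def Spec_check_periodicity (key_map : List (Int × Int)) (positions : List Int) (out : List Int) : Prop := out = check_periodicity_alt key_map positions
instance (key_map : List (Int × Int)) (positions : List Int) (out : List Int) : Decidable (Spec_check_periodicity key_map positions out) := by unfold Spec_check_periodicity; infer_instance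

-- ===== CLAIM (what is proved, stated in full; the proofs are below) =====
def Claim_equal_check_periodicity : Prop := ∀ (key_map : List (Int × Int)) (positions : List Int), Dom_check_periodicity key_map positions → Pre_check_periodicity key_map positions → Spec_check_periodicity key_map positions (check_periodicity key_map positions)

-- ===== LEMMAS AND PROOFS =====

-- set(vals) has at most one element iff all elements of vals are equal
lemma pvSetLen_le_one_iff (l : List Int) :
    ¬ (PySem.Set.ofList l).length > 1 ↔ ∀ a ∈ l, ∀ b ∈ l, a = b := by
  constructor
  · intro h a ha b hb
    have ha' : a ∈ PySem.Set.ofList l := (PySem.Set.mem_ofList l a).mpr ha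
    have hb' : b ∈ PySem.Set.ofList l := (PySem.Set.mem_ofList l b).mpr hb
    cases hsl : PySem.Set.ofList l with
    | nil => rw [hsl] at ha'; simp at ha'
    | cons x t =>
      cases t with
      | nil =>
        rw [hsl, List.mem_singleton] at ha' hb'
        rw [ha', hb']
      | cons y u => rw [hsl] at h; simp at h
  · intro hall h
    have hnd := PySem.Set.nodup_ofList (xs := l)
    cases hsl : PySem.Set.ofList l with
    | nil => rw [hsl] at h; simp at h
    | cons x t =>
      cases t with
      | nil => rw [hsl] at h; simp at h
      | cons y u =>
        rw [hsl] at hnd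
        have hxy : x ≠ y := by
          intro hxy; subst hxy; simp at hnd
        have hx : x ∈ l := (PySem.Set.mem_ofList l x).mp (by rw [hsl]; simp)
        have hy : y ∈ l := (PySem.Set.mem_ofList l y).mp (by rw [hsl]; simp)
        exact hxy (hall x hx y hy)

-- pvOkLoop is the 'all buckets pass' test
lemma pvOkLoop_eq_all (l : List (Int × List Int)) :
    pvOkLoop l = l.all (fun p => !((PySem.Set.ofList p.2).length > 1 : Bool)) := by
  induction l with
  | nil => rfl
  | cons h t ih =>
    obtain ⟨k, vals⟩ := h
    by_cases hv : (PySem.Set.ofList vals).length > 1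
    · simp [pvOkLoop, hv]
    · simp [pvOkLoop, hv, ih]

-- the grouped values at bucket c are the values of the positions with residue c
lemma pvGroups_getD (key_map : List (Int × Int)) (period : Int) (positions : List Int)
    (c : Int) :
    (pvGroups key_map period positions).getD c [] =
      (positions.filter (fun x => PySem.Int.mod x period == c)).map (pvAVal key_map) := by
  have hfold : pvGroups key_map period positions =
      (positions.map (fun pos => (PySem.Int.mod pos period, pvAVal key_map pos))).foldl
        (fun d p => d.modify p.1 [] (fun l => l ++ [p.2])) PySem.Dict.empty := by
    rw [List.foldl_map]
    rfl
  rw [hfold, PySem.Dict.getD_foldl_modify_append]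
  simp [List.filter_map, List.map_map, Function.comp_def]

lemma pvGroups_keys (key_map : List (Int × Int)) (period : Int) (positions : List Int) :
    (pvGroups key_map period positions).keys =
      PySem.Set.ofList (positions.map (fun x => PySem.Int.mod x period)) := by
  unfold pvGroups
  rw [PySem.Dict.keys_foldl_modify_key]
  simp [PySem.Set.update_nil_left]

-- A's per-period test, characterised
lemma pvOkA_iff (key_map : List (Int × Int)) (period : Int) (positions : List Int) :
    pvOkLoop (pvGroups key_map period positions).items = true ↔
      ∀ x ∈ positions, ∀ y ∈ positions,
        PySem.Int.mod x period = PySem.Int.mod y period →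
          pvAVal key_map x = pvAVal key_map y := by
  have hnd : (pvGroups key_map period positions).keys.Nodup := by
    unfold pvGroups
    exact PySem.Dict.nodup_keys_foldl_modify_key _ _ _ _ _ (by simp)
  rw [PySem.Dict.items_eq_map_keys _ hnd []]
  rw [pvOkLoop_eq_all, List.all_map]
  simp only [List.all_eq_true, Function.comp_apply, Bool.not_eq_eq_eq_not, Bool.not_true,
    decide_eq_false_iff_not]
  constructor
  · intro h x hx y hy hres
    have hc : PySem.Int.mod x period ∈ (pvGroups key_map period positions).keys := by
      rw [pvGroups_keys]
      exact (PySem.Set.mem_ofList _ _).mpr (List.mem_map_of_mem hx)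
    have h2 := (pvSetLen_le_one_iff _).mp (h _ hc)
    rw [pvGroups_getD] at h2
    apply h2
    · exact List.mem_map_of_mem (List.mem_filter.mpr ⟨hx, by simp⟩)
    · exact List.mem_map_of_mem (List.mem_filter.mpr ⟨hy, by simp [hres]⟩)
  · intro h c _
    rw [pvSetLen_le_one_iff, pvGroups_getD]
    rintro a ha b hb
    obtain ⟨x, hx, rfl⟩ := List.mem_map.mp ha
    obtain ⟨y, hy, rfl⟩ := List.mem_map.mp hb
    have hx' := List.mem_filter.mp hx
    have hy' := List.mem_filter.mp hy
    exact h x hx'.1 y hy'.1 (by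
      have h1 : PySem.Int.mod x period = c := by simpa using hx'.2
      have h2 : PySem.Int.mod y period = c := by simpa using hy'.2
      rw [h1, h2])

-- B's bad-set, characterised
lemma pvMem_mark (q d : Int) (bad : PySem.Set Int) :
    q ∈ pvMark d bad ↔ q ∈ bad ∨ (1 ≤ q ∧ q < 50 ∧ PySem.Int.mod d q = 0) := by
  unfold pvMark
  rw [PySem.List.foldl_if_eq_foldl_filter]
  rw [PySem.Set.mem_foldl_add (f := fun (b : Int) => b)]
  simp only [List.mem_filter, PySem.List.mem_pyRange_one, beq_iff_eq]
  constructor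
  · rintro (h | ⟨b, ⟨⟨h1, h2⟩, h3⟩, rfl⟩)
    · exact Or.inl h
    · exact Or.inr ⟨h1, h2, h3⟩
  · rintro (h | ⟨h1, h2, h3⟩)
    · exact Or.inl h
    · exact Or.inr ⟨q, ⟨⟨h1, h2⟩, h3⟩, rfl⟩

lemma pvMem_inner (q p1 v1 : Int) (rest : List (Int × Int)) (bad : PySem.Set Int) :
    q ∈ pvInner p1 v1 rest bad ↔
      q ∈ bad ∨ ∃ pv ∈ rest, v1 ≠ pv.2 ∧ 1 ≤ q ∧ q < 50 ∧ PySem.Int.mod |p1 - pv.1| q = 0 := by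
  induction rest generalizing bad with
  | nil => simp [pvInner]
  | cons h t ih =>
    have hstep : pvInner p1 v1 (h :: t) bad =
        pvInner p1 v1 t (if v1 ≠ h.2 then pvMark |p1 - h.1| bad else bad) := rfl
    rw [hstep, ih]
    by_cases hv : v1 = h.2
    · rw [if_neg (by simp [hv])]
      constructor
      · rintro (hb | ⟨pv, hpv, hc⟩)
        · exact Or.inl hb
        · exact Or.inr ⟨pv, List.mem_cons_of_mem _ hpv, hc⟩
      · rintro (hb | ⟨pv, hpv, hc⟩)
        · exact Or.inl hb
        · rcases List.mem_cons.mp hpv with rfl | hpv'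
          · exact absurd hv hc.1
          · exact Or.inr ⟨pv, hpv', hc⟩
    · rw [if_pos hv, pvMem_mark]
      constructor
      · rintro ((hb | hm) | ⟨pv, hpv, hc⟩)
        · exact Or.inl hb
        · exact Or.inr ⟨h, List.mem_cons_self .., hv, hm⟩
        · exact Or.inr ⟨pv, List.mem_cons_of_mem _ hpv, hc⟩
      · rintro (hb | ⟨pv, hpv, hc⟩)
        · exact Or.inl (Or.inl hb)
        · rcases List.mem_cons.mp hpv with rfl | hpv'
          · exact Or.inl (Or.inr hc.2)
          · exact Or.inr ⟨pv, hpv', hc⟩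

lemma pvMem_bad (q : Int) (l : List (Int × Int)) (bad : PySem.Set Int) :
    q ∈ pvBad l bad ↔
      q ∈ bad ∨ ∃ x ∈ l, ∃ y ∈ l,
        x.2 ≠ y.2 ∧ 1 ≤ q ∧ q < 50 ∧ PySem.Int.mod |x.1 - y.1| q = 0 := by
  induction l generalizing bad with
  | nil => simp [pvBad]
  | cons h t ih =>
    rw [show pvBad (h :: t) bad = pvBad t (pvInner h.1 h.2 t bad) from rfl, ih, pvMem_inner]
    constructor
    · rintro ((hb | ⟨pv, hpv, hc⟩) | ⟨x, hx, y, hy, hc⟩)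
      · exact Or.inl hb
      · exact Or.inr ⟨h, List.mem_cons_self .., pv, List.mem_cons_of_mem _ hpv, hc⟩
      · exact Or.inr ⟨x, List.mem_cons_of_mem _ hx, y, List.mem_cons_of_mem _ hy, hc⟩
    · rintro (hb | ⟨x, hx, y, hy, hne, hq1, hq2, hdv⟩)
      · exact Or.inl (Or.inl hb)
      · rcases List.mem_cons.mp hx with rfl | hx'
        · rcases List.mem_cons.mp hy with rfl | hy'
          · exact absurd rfl hne
          · exact Or.inl (Or.inr ⟨y, hy', hne, hq1, hq2, hdv⟩)
        · rcases List.mem_cons.mp hy with rfl | hy'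
          · refine Or.inl (Or.inr ⟨x, hx', Ne.symm hne, hq1, hq2, ?_⟩)
            rwa [abs_sub_comm]
          · exact Or.inr ⟨x, hx', y, hy', hne, hq1, hq2, hdv⟩

-- residues agree iff the period divides the distance
lemma pvMod_eq_iff (x y p : Int) (hp : 0 < p) :
    PySem.Int.mod x p = PySem.Int.mod y p ↔ PySem.Int.mod |x - y| p = 0 := by
  rw [PySem.Int.mod_eq_emod_of_pos hp, PySem.Int.mod_eq_emod_of_pos hp,
    PySem.Int.mod_eq_emod_of_pos hp, Int.emod_eq_emod_iff_emod_sub_eq_zero,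
    ← Int.dvd_iff_emod_eq_zero, ← Int.dvd_iff_emod_eq_zero, dvd_abs]

-- ===== VERDICT (by name: the statement is the Claim_ definition above) =====
theorem check_periodicity_spec : Claim_equal_check_periodicity := by
  intro key_map positions _ _
  unfold Spec_check_periodicity check_periodicity check_periodicity_alt
  rw [PySem.List.foldl_append_if_eq_filter
    (p := fun period => pvOkLoop (pvGroups key_map period positions).items)]
  rw [List.nil_append]
  show _ = (PySem.List.pyRange 1 50 1).filter (fun p => !(PySem.Set.contains
    (pvBad (positions.map (fun z => (z, ((PySem.Dict.mk key_map).get? z).getD 0)))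
      PySem.Set.empty) p))
  apply List.filter_congr
  intro p hp
  have hp' : 1 ≤ p ∧ p < 50 := (PySem.List.mem_pyRange_one).mp hp
  have hbad : ∀ (s : PySem.Set Int) (q : Int), (!(PySem.Set.contains s q)) = true ↔ ¬ q ∈ s := by
    intro s q
    simp
  rw [Bool.eq_iff_iff, pvOkA_iff, hbad, pvMem_bad]
  constructor
  · intro h hc
    rcases hc with hc | ⟨x, hx, y, hy, hne, _, _, hdv⟩
    · simp [PySem.Set.empty] at hc
    · obtain ⟨z, hz, rfl⟩ := List.mem_map.mp hx
      obtain ⟨w, hw, rfl⟩ := List.mem_map.mp hy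
      exact hne (h z hz w hw ((pvMod_eq_iff z w p (by omega)).mpr hdv))
  · intro h z hz w hw hres
    by_contra hne
    exact h (Or.inr ⟨(z, ((PySem.Dict.mk key_map).get? z).getD 0), List.mem_map_of_mem hz,
      (w, ((PySem.Dict.mk key_map).get? w).getD 0), List.mem_map_of_mem hw,
      hne, hp'.1, hp'.2, (pvMod_eq_iff z w p (by omega)).mp hres⟩)
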